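-- pv_equiv track=rewrite | github.com/BlackStar1979/romionsim | core/rules.py | _cluster_distance_bg
-- ===== SOURCE A (Python) =====
-- def _cluster_distance_bg(c1: list, c2: list, bg_graph: dict) -> int:
--     """
--     Compute minimum distance between two clusters in background graph.
--
--     Uses multi-source BFS from all nodes in c1 to find closest node in c2.
--     """
--     if not c1 or not c2:
--         return None
--
--     # BFS from all nodes in c1
--     queue = [(u, 0) for u in c1]
--     visited = set(c1)
--
--     while queue:
--         u, dist = queue.pop(0)
--
--         # Check if we reached c2
--         if u in c2:
--             return dist
--
--         # Expand neighbors in background graph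
--         for v in bg_graph.get(u, []):
--             if v not in visited:
--                 visited.add(v)
--                 queue.append((v, dist + 1))
--
--     return None  # No path found
-- ===== SOURCE B (Python) =====
-- def _cluster_distance_bg(c1: list, c2: list, bg_graph: dict) -> int:
--     """Level-synchronous BFS: one frontier list per distance, duplicates pruned
--     against the frontier being built, visited updated wholesale per level."""
--     if not c1 or not c2:
--         return None
--     targets = set(c2)
--     visited = set(c1)
--     frontier = list(c1)
--     dist = 0
--     while frontier:
--         if targets.intersection(frontier):
--             return dist
--         nxt = []
--         for u in frontier:
--             for v in bg_graph.get(u, []):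
--                 if v not in visited and v not in nxt:
--                     nxt.append(v)
--         visited.update(nxt)
--         frontier = nxt
--         dist += 1
--     return None
-- ===== Notes on version B (the rewrite author's own statement) =====
-- stated objective: alternative
-- what changed: Replaces the FIFO-queue BFS (queue.pop(0), per-node list-membership tests against c2) by a level-synchronous BFS that builds one frontier list per distance, deduplicates against the frontier under construction, updates the visited set wholesale per level, and tests targets by set intersection built once.
import Mathlib
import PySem

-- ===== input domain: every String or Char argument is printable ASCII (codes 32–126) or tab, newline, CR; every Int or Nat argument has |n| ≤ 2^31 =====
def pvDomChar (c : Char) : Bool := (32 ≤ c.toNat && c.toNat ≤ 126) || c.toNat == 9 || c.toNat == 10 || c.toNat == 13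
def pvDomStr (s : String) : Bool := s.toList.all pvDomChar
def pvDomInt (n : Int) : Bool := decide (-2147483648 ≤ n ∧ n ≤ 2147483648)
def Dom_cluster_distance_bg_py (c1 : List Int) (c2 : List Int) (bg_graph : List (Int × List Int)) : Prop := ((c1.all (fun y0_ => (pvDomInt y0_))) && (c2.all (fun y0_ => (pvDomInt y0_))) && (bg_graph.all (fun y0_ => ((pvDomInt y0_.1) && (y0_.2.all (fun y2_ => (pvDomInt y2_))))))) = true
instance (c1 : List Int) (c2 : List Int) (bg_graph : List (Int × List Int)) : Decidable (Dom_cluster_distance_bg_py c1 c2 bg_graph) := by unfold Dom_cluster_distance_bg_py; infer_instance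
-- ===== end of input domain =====

-- ===== PORT A =====
-- B replaces A's pop(0) FIFO-queue BFS by a level-synchronous BFS that builds one frontier list per
-- distance (deduplicated against the list under construction) and updates visited wholesale per level
-- (objective: alternative; return values proved equal).
-- A-side helper: bg_graph.get(u, []) (first match, per the dict convention)
def pvAdj (bg : List (Int × List Int)) (u : Int) : List Int :=
  PySem.Dict.getD (PySem.Dict.mk bg) u []

-- body of A's inner 'for v in bg_graph.get(u, [])' loop (state: visited, queue)
def pvStepA (d : Int) (st : PySem.Set Int × List (Int × Int)) (v : Int) : PySem.Set Int × List (Int × Int) :=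
  if PySem.Set.contains st.1 v then st else (PySem.Set.add st.1 v, st.2 ++ [(v, d + 1)])

-- A's 'while queue' loop; the fuel is a guard only: the value passed by the port is proved sufficient
def pvLoopA (c2 : List Int) (bg : List (Int × List Int)) : Nat → List (Int × Int) → PySem.Set Int → Option Int
  | _, [], _ => none
  | 0, _ :: _, _ => none
  | f + 1, (u, d) :: rest, visited =>
      if c2.contains u then some d
      else
        let st := (pvAdj bg u).foldl (pvStepA d) (visited, rest)
        pvLoopA c2 bg f st.2 st.1

def cluster_distance_bg_py (c1 : List Int) (c2 : List Int) (bg_graph : List (Int × List Int)) : Option Int :=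
  if c1.isEmpty || c2.isEmpty then none
  else pvLoopA c2 bg_graph (c1.length + (bg_graph.map (fun p => p.2.length)).sum + 1)
        (c1.map (fun u => (u, (0 : Int)))) (PySem.Set.ofList c1)

-- ===== PORT B =====
-- B's level builder: nxt collects unseen neighbours of the frontier, deduplicating against nxt itself
def pvNext (bg : List (Int × List Int)) (visited : PySem.Set Int) (frontier : List Int) : List Int :=
  frontier.foldl (fun nxt u =>
      (PySem.Dict.getD (PySem.Dict.mk bg) u []).foldl
        (fun nxt v => if PySem.Set.contains visited v || nxt.contains v then nxt else nxt.concat v) nxt) []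

-- B's 'while frontier' loop; fuel is a guard only, proved sufficient for the value the port passes
def pvLoopB (targets : PySem.Set Int) (bg : List (Int × List Int)) : Nat → List Int → PySem.Set Int → Int → Option Int
  | 0, _, _, _ => none
  | f + 1, frontier, visited, dist =>
      if frontier.isEmpty then none
      else if !(frontier.filter (fun u => PySem.Set.contains targets u)).isEmpty then some dist
      else
        let nxt := pvNext bg visited frontier
        pvLoopB targets bg f nxt (PySem.Set.update visited nxt) (dist + 1)

def cluster_distance_bg_py_alt (c1 : List Int) (c2 : List Int) (bg_graph : List (Int × List Int)) : Option Int :=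
  if c1.isEmpty then none
  else if c2.isEmpty then none
  else pvLoopB (PySem.Set.ofList c2) bg_graph ((c1 ++ bg_graph.flatMap (fun p => p.2)).length + 2)
        c1 (PySem.Set.ofList c1) 0

-- ===== PRECONDITION & SPEC =====
def Spec_cluster_distance_bg_py (c1 : List Int) (c2 : List Int) (bg_graph : List (Int × List Int)) (out : Option Int) : Prop := out = cluster_distance_bg_py_alt c1 c2 bg_graph
instance (c1 : List Int) (c2 : List Int) (bg_graph : List (Int × List Int)) (out : Option Int) : Decidable (Spec_cluster_distance_bg_py c1 c2 bg_graph out) := by unfold Spec_cluster_distance_bg_py; infer_instance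

-- ===== CLAIM (what is proved, stated in full; the proofs are below) =====
def Claim_equal_cluster_distance_bg_py : Prop := ∀ (c1 : List Int) (c2 : List Int) (bg_graph : List (Int × List Int)), Dom_cluster_distance_bg_py c1 c2 bg_graph → Spec_cluster_distance_bg_py c1 c2 bg_graph (cluster_distance_bg_py c1 c2 bg_graph)

-- ===== LEMMAS AND PROOFS =====

-- proof-only intermediate: A's inner step with the (visited, nxt)-pair state
def pvStepB (st : PySem.Set Int × List Int) (v : Int) : PySem.Set Int × List Int :=
  if PySem.Set.contains st.1 v then st else (PySem.Set.add st.1 v, st.2 ++ [v])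

-- one whole-level expansion with paired state (proof-only)
def pvE (bg : List (Int × List Int)) (s : PySem.Set Int) (us : List Int) : PySem.Set Int × List Int :=
  us.foldl (fun st u => (pvAdj bg u).foldl pvStepB st) (s, ([] : List Int))

-- potential: adjacency values not yet visited (bounds the remaining work of both loops)
def pvR (bg : List (Int × List Int)) (s : PySem.Set Int) : Nat :=
  ((bg.flatMap (fun p => p.2)).toFinset \ s.toFinset).card

theorem pvShiftB (nbrs : List Int) (s : PySem.Set Int) (acc : List Int) :
    nbrs.foldl pvStepB (s, acc)
      = ((nbrs.foldl pvStepB (s, [])).1, acc ++ (nbrs.foldl pvStepB (s, [])).2) := by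
  induction nbrs generalizing s acc with
  | nil => simp
  | cons v nbrs ih =>
    simp only [List.foldl_cons, pvStepB]
    by_cases h : PySem.Set.contains s v
    · rw [if_pos h, if_pos h, ih s acc]
    · rw [if_neg h, if_neg h]
      rw [ih (PySem.Set.add s v) (acc ++ [v]), ih (PySem.Set.add s v) ([] ++ [v])]
      simp

theorem pvContainsOfList (c2 : List Int) (u : Int) :
    PySem.Set.contains (PySem.Set.ofList c2) u = c2.contains u := by
  rw [Bool.eq_iff_iff]
  simp only [PySem.Set.contains, List.contains_iff_mem]
  exact PySem.Set.mem_ofList c2 u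

theorem pvAdj_sub (bg : List (Int × List Int)) (u : Int) :
    ∀ v ∈ pvAdj bg u, v ∈ bg.flatMap (fun p => p.2) := by
  intro v hv
  unfold pvAdj PySem.Dict.getD PySem.Dict.get? at hv
  cases hfind : List.find? (fun p => p.1 == u) (PySem.Dict.mk bg).items with
  | none => simp [hfind] at hv
  | some p =>
    simp only [hfind, Option.map_some, Option.getD_some] at hv
    exact List.mem_flatMap.2 ⟨p, List.mem_of_find?_eq_some hfind, hv⟩

theorem pvShiftA (d : Int) (nbrs : List Int) (s : PySem.Set Int) (q : List (Int × Int)) :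
    nbrs.foldl (pvStepA d) (s, q)
      = ((nbrs.foldl pvStepB (s, [])).1,
         q ++ ((nbrs.foldl pvStepB (s, [])).2).map (fun v => (v, d + 1))) := by
  induction nbrs generalizing s q with
  | nil => simp
  | cons v nbrs ih =>
    simp only [List.foldl_cons, pvStepA, pvStepB]
    by_cases h : PySem.Set.contains s v
    · rw [if_pos h, if_pos h, ih s q]
    · rw [if_neg h, if_neg h, ih (PySem.Set.add s v) (q ++ [(v, d+1)]),
          pvShiftB nbrs (PySem.Set.add s v) ([] ++ [v])]
      simp

theorem pvShiftE (bg : List (Int × List Int)) (us : List Int) (s : PySem.Set Int) (acc : List Int) :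
    us.foldl (fun st u => (pvAdj bg u).foldl pvStepB st) (s, acc)
      = ((pvE bg s us).1, acc ++ (pvE bg s us).2) := by
  induction us generalizing s acc with
  | nil => simp [pvE]
  | cons u us ih =>
    simp only [pvE, List.foldl_cons]
    rw [pvShiftB (pvAdj bg u) s acc, pvShiftB (pvAdj bg u) s []]
    simp only [List.nil_append]
    rw [ih, ih]
    simp [pvE]

theorem pvInvB (nbrs : List Int) (s : PySem.Set Int) :
    (nbrs.foldl pvStepB (s, [])).1 = s ++ (nbrs.foldl pvStepB (s, [])).2
      ∧ ∀ v ∈ (nbrs.foldl pvStepB (s, [])).2, v ∈ nbrs := by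
  induction nbrs generalizing s with
  | nil => simp
  | cons v nbrs ih =>
    simp only [List.foldl_cons, pvStepB]
    by_cases h : PySem.Set.contains s v
    · rw [if_pos h]
      exact ⟨(ih s).1, fun w hw => List.mem_cons_of_mem v ((ih s).2 w hw)⟩
    · rw [if_neg h, pvShiftB nbrs (PySem.Set.add s v) ([] ++ [v])]
      have hadd : PySem.Set.add s v = s ++ [v] := by
        simp [PySem.Set.add, PySem.Set.contains]
        simpa [List.contains_iff_mem] using h
      refine ⟨?_, ?_⟩
      · rw [(ih (PySem.Set.add s v)).1, hadd]
        simp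
      · intro w hw
        simp only [List.nil_append, List.cons_append, List.mem_cons] at hw
        rcases hw with h1 | h2
        · simp [h1]
        · exact List.mem_cons_of_mem v ((ih (PySem.Set.add s v)).2 w h2)

theorem pvInvE (bg : List (Int × List Int)) (us : List Int) (s : PySem.Set Int) :
    (pvE bg s us).1 = s ++ (pvE bg s us).2
      ∧ ∀ v ∈ (pvE bg s us).2, v ∈ bg.flatMap (fun p => p.2) := by
  induction us generalizing s with
  | nil => simp [pvE]
  | cons u us ih =>
    have hE : pvE bg s (u :: us)
        = ((pvE bg ((pvAdj bg u).foldl pvStepB (s, [])).1 us).1,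
           ((pvAdj bg u).foldl pvStepB (s, [])).2 ++ (pvE bg ((pvAdj bg u).foldl pvStepB (s, [])).1 us).2) := by
      simp only [pvE, List.foldl_cons]
      rw [pvShiftB (pvAdj bg u) s [], pvShiftE bg us _ _]
      simp [pvE]
    rw [hE]
    obtain ⟨hb1, hb2⟩ := pvInvB (pvAdj bg u) s
    obtain ⟨he1, he2⟩ := ih ((pvAdj bg u).foldl pvStepB (s, [])).1
    refine ⟨?_, ?_⟩
    · rw [he1, hb1]; simp
    · intro v hv
      rcases List.mem_append.mp hv with h1 | h2
      · exact pvAdj_sub bg u v (hb2 v h1)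
      · exact he2 v h2

theorem pvNodupB (nbrs : List Int) (s : PySem.Set Int) (h : s.Nodup) :
    (nbrs.foldl pvStepB (s, [])).1.Nodup := by
  induction nbrs generalizing s with
  | nil => simpa
  | cons v nbrs ih =>
    simp only [List.foldl_cons, pvStepB]
    by_cases hc : PySem.Set.contains s v
    · rw [if_pos hc]; exact ih s h
    · rw [if_neg hc, pvShiftB nbrs (PySem.Set.add s v) ([] ++ [v])]
      exact ih (PySem.Set.add s v) (PySem.Set.nodup_add s v h)

theorem pvNodupE (bg : List (Int × List Int)) (us : List Int) (s : PySem.Set Int)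
    (h : s.Nodup) : (pvE bg s us).1.Nodup := by
  induction us generalizing s with
  | nil => simpa [pvE]
  | cons u us ih =>
    simp only [pvE, List.foldl_cons]
    rw [pvShiftB (pvAdj bg u) s [], pvShiftE bg us _ _]
    exact ih _ (pvNodupB (pvAdj bg u) s h)

theorem pvCardE (bg : List (Int × List Int)) (us : List Int) (s : PySem.Set Int)
    (h : s.Nodup) : pvR bg (pvE bg s us).1 + (pvE bg s us).2.length = pvR bg s := by
  obtain ⟨heq, hsub⟩ := pvInvE bg us s
  have hnodup : (pvE bg s us).1.Nodup := pvNodupE bg us s h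
  rw [heq] at hnodup
  have hnew : (pvE bg s us).2.Nodup := (List.nodup_append.mp hnodup).2.1
  have hdisj : ∀ v ∈ (pvE bg s us).2, v ∉ s := by
    intro v hv hvs
    exact List.disjoint_of_nodup_append hnodup hvs hv
  unfold pvR
  rw [heq, List.toFinset_append]
  have hsubF : (pvE bg s us).2.toFinset ⊆ (bg.flatMap (fun p => p.2)).toFinset \ s.toFinset := by
    intro v hv
    rw [List.mem_toFinset] at hv
    rw [Finset.mem_sdiff, List.mem_toFinset, List.mem_toFinset]
    exact ⟨hsub v hv, hdisj v hv⟩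
  have hUAB : (bg.flatMap (fun p => p.2)).toFinset \ (s.toFinset ∪ (pvE bg s us).2.toFinset)
      = ((bg.flatMap (fun p => p.2)).toFinset \ s.toFinset) \ (pvE bg s us).2.toFinset := by
    ext x; simp [Finset.mem_sdiff]; tauto
  rw [hUAB, Finset.card_sdiff_of_subset hsubF, List.toFinset_card_of_nodup hnew]
  exact Nat.sub_add_cancel (le_trans (by rw [List.toFinset_card_of_nodup hnew]) (Finset.card_le_card hsubF))

-- B's flat inner fold equals the paired fold: predicate split over s ++ acc
theorem pvFlatB (nbrs : List Int) (s : PySem.Set Int) (acc : List Int) :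
    nbrs.foldl pvStepB (s ++ acc, acc)
      = (s ++ nbrs.foldl (fun nxt v => if PySem.Set.contains s v || nxt.contains v then nxt else nxt.concat v) acc,
         nbrs.foldl (fun nxt v => if PySem.Set.contains s v || nxt.contains v then nxt else nxt.concat v) acc) := by
  induction nbrs generalizing acc with
  | nil => simp
  | cons v nbrs ih =>
    simp only [List.foldl_cons, pvStepB]
    have hsplit : PySem.Set.contains (s ++ acc) v = (PySem.Set.contains s v || acc.contains v) := by
      simp [PySem.Set.contains, List.mem_append]
    by_cases h : (PySem.Set.contains s v || acc.contains v) = true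
    · rw [if_pos (by rw [hsplit]; exact h), if_pos h]
      exact ih acc
    · rw [if_neg (by rw [hsplit]; exact h), if_neg h]
      have hvm : v ∉ s ∧ v ∉ acc := by
        simpa [List.contains_iff_mem, not_or] using h
      have hadd : PySem.Set.add (s ++ acc) v = s ++ acc.concat v := by
        simp [PySem.Set.add, PySem.Set.contains, hvm.1, hvm.2]
      rw [List.concat_eq_append] at hadd ⊢
      simp only [hadd]
      exact ih (acc ++ [v])

-- B's level builder equals the second component of the paired level expansion
theorem pvNextE (bg : List (Int × List Int)) (us : List Int) (s : PySem.Set Int) :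
    pvE bg s us = (s ++ pvNext bg s us, pvNext bg s us) := by
  unfold pvE pvNext
  have key : ∀ (us : List Int) (acc : List Int),
      us.foldl (fun st u => (pvAdj bg u).foldl pvStepB st) (s ++ acc, acc)
        = (s ++ us.foldl (fun nxt u =>
              (PySem.Dict.getD (PySem.Dict.mk bg) u []).foldl
                (fun nxt v => if PySem.Set.contains s v || nxt.contains v then nxt else nxt.concat v) nxt) acc,
           us.foldl (fun nxt u =>
              (PySem.Dict.getD (PySem.Dict.mk bg) u []).foldl
                (fun nxt v => if PySem.Set.contains s v || nxt.contains v then nxt else nxt.concat v) nxt) acc) := by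
    intro us
    induction us with
    | nil => simp
    | cons u us ih =>
      intro acc
      simp only [List.foldl_cons]
      rw [show (PySem.Dict.getD (PySem.Dict.mk bg) u []) = pvAdj bg u from rfl,
          pvFlatB (pvAdj bg u) s acc]
      exact ih _
  have := key us []
  simpa using this

-- visited.update(nxt) on fresh, duplicate-free nxt is plain append
theorem pvUpdateFresh (nxt : List Int) (s : PySem.Set Int) (h : (s ++ nxt).Nodup) :
    PySem.Set.update s nxt = s ++ nxt := by
  induction nxt generalizing s with
  | nil => simp [PySem.Set.update]
  | cons v nxt ih =>
    have hv : v ∉ s := by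
      intro hvs
      exact List.disjoint_of_nodup_append h hvs (List.mem_cons_self)
    have hadd : PySem.Set.add s v = s ++ [v] := by
      simp [PySem.Set.add, PySem.Set.contains]
      simpa [List.contains_iff_mem] using hv
    have h' : ((s ++ [v]) ++ nxt).Nodup := by
      simpa using h
    calc PySem.Set.update s (v :: nxt)
        = PySem.Set.update (PySem.Set.add s v) nxt := by simp [PySem.Set.update]
      _ = (s ++ [v]) ++ nxt := by rw [hadd]; exact ih (s ++ [v]) h'
      _ = s ++ v :: nxt := by simp

-- filter-emptiness test equals 'any'
theorem pvFilterAny (p : Int → Bool) (l : List Int) :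
    (!(l.filter p).isEmpty) = l.any p := by
  rw [Bool.eq_iff_iff]
  simp [List.filter_eq_nil_iff, List.any_eq_true]

theorem pvMID (c2 : List Int) (bg : List (Int × List Int)) :
    ∀ (cur : List Int) (fuel : Nat) (nxt : List Int) (s : PySem.Set Int) (d : Int),
    pvLoopA c2 bg (fuel + cur.length)
        (cur.map (fun u => (u, d)) ++ nxt.map (fun v => (v, d + 1))) s
      = if cur.any (fun u => c2.contains u) then some d
        else pvLoopA c2 bg fuel ((nxt ++ (pvE bg s cur).2).map (fun v => (v, d + 1))) (pvE bg s cur).1 := by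
  intro cur
  induction cur with
  | nil => intro fuel nxt s d; simp [pvE]
  | cons u cur ih =>
    intro fuel nxt s d
    have hlen : fuel + (u :: cur).length = (fuel + cur.length) + 1 := by simp; omega
    rw [hlen]
    simp only [List.map_cons, List.cons_append, List.any_cons]
    rw [pvLoopA]
    by_cases hu : c2.contains u
    · have hu' : u ∈ c2 := by simpa [List.contains_iff_mem] using hu
      simp [hu']
    · rw [if_neg hu]
      simp only [hu, Bool.false_or]
      have hA := pvShiftA d (pvAdj bg u) s (cur.map (fun u => (u, d)) ++ nxt.map (fun v => (v, d + 1)))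
      rw [hA]
      have hE : pvE bg s (u :: cur)
          = ((pvE bg ((pvAdj bg u).foldl pvStepB (s, [])).1 cur).1,
             ((pvAdj bg u).foldl pvStepB (s, [])).2 ++ (pvE bg ((pvAdj bg u).foldl pvStepB (s, [])).1 cur).2) := by
        simp only [pvE, List.foldl_cons]
        rw [pvShiftB (pvAdj bg u) s []]; rw [pvShiftE bg cur _ _]; simp [pvE]
      have hq : (List.map (fun u => (u, d)) cur ++ List.map (fun v => (v, d + 1)) nxt)
            ++ List.map (fun v => (v, d + 1)) ((pvAdj bg u).foldl pvStepB (s, [])).2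
          = List.map (fun u => (u, d)) cur
            ++ List.map (fun v => (v, d + 1)) (nxt ++ ((pvAdj bg u).foldl pvStepB (s, [])).2) := by
        simp
      rw [hq, ih fuel (nxt ++ ((pvAdj bg u).foldl pvStepB (s, [])).2) ((pvAdj bg u).foldl pvStepB (s, [])).1 d, hE]
      by_cases hc : cur.any (fun u => c2.contains u) <;> simp

theorem pvTOP (c2 : List Int) (bg : List (Int × List Int)) :
    ∀ (fuelB : Nat) (frontier : List Int) (s : PySem.Set Int) (d : Int) (fuelA : Nat),
    s.Nodup →
    (frontier ≠ [] → (frontier.length + pvR bg s < fuelA ∧ pvR bg s + 2 ≤ fuelB)) →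
    pvLoopA c2 bg fuelA (frontier.map (fun u => (u, d))) s
      = pvLoopB (PySem.Set.ofList c2) bg fuelB frontier s d := by
  intro fuelB
  induction fuelB with
  | zero =>
    intro frontier s d fuelA _ hcond
    cases frontier with
    | nil => cases fuelA <;> simp [pvLoopA, pvLoopB]
    | cons u fr => exact absurd ((hcond (by simp)).2) (by omega)
  | succ f ih =>
    intro frontier s d fuelA hnd hcond
    cases frontier with
    | nil => cases fuelA <;> simp [pvLoopA, pvLoopB]
    | cons u fr =>
      obtain ⟨hA, hB⟩ := hcond (by simp)
      have hlen : (u :: fr).length ≤ fuelA := by omega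
      have hfuelA : fuelA = (fuelA - (u :: fr).length) + (u :: fr).length := by omega
      rw [hfuelA]
      have hmid := pvMID c2 bg (u :: fr) (fuelA - (u :: fr).length) [] s d
      simp only [List.map_nil, List.nil_append] at hmid
      rw [← List.append_nil (List.map (fun u => (u, d)) (u :: fr))]
      rw [hmid]
      have hany : (!((u :: fr).filter (fun u => PySem.Set.contains (PySem.Set.ofList c2) u)).isEmpty)
          = (u :: fr).any (fun u => c2.contains u) := by
        rw [pvFilterAny]
        simp only [pvContainsOfList]
      rw [pvLoopB]
      simp only [List.isEmpty_cons, Bool.false_eq_true, if_false, hany]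
      by_cases hc : (u :: fr).any (fun u => c2.contains u)
      · rw [if_pos hc, if_pos hc]
      · rw [if_neg hc, if_neg hc]
        have hcard := pvCardE bg (u :: fr) s hnd
        have hnd' := pvNodupE bg (u :: fr) s hnd
        have hEeq := pvNextE bg (u :: fr) s
        have h1 : (pvE bg s (u :: fr)).1 = s ++ pvNext bg s (u :: fr) := by rw [hEeq]
        have h2 : (pvE bg s (u :: fr)).2 = pvNext bg s (u :: fr) := by rw [hEeq]
        have hup : PySem.Set.update s (pvNext bg s (u :: fr)) = (pvE bg s (u :: fr)).1 := by
          rw [h1]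
          exact pvUpdateFresh _ s (by rw [← h1]; exact hnd')
        rw [← h2] at hup ⊢
        rw [hup]
        exact ih (pvE bg s (u :: fr)).2 (pvE bg s (u :: fr)).1 (d + 1) (fuelA - (u :: fr).length) hnd'
          (fun hne => by
            have hpos : 1 ≤ (pvE bg s (u :: fr)).2.length := List.length_pos_iff.mpr hne
            omega)

theorem pv_main_eq (c1 c2 : List Int) (bg : List (Int × List Int)) :
    cluster_distance_bg_py c1 c2 bg = cluster_distance_bg_py_alt c1 c2 bg := by
  unfold cluster_distance_bg_py cluster_distance_bg_py_alt
  by_cases h1 : c1.isEmpty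
  · simp [h1]
  · by_cases h2 : c2.isEmpty
    · simp [h1, h2]
    · rw [if_neg (by simp [h1, h2]), if_neg h1, if_neg h2]
      have hR : pvR bg (PySem.Set.ofList c1) ≤ (bg.map (fun p => p.2.length)).sum := by
        calc pvR bg (PySem.Set.ofList c1)
            ≤ (bg.flatMap (fun p => p.2)).toFinset.card :=
              Finset.card_le_card (Finset.sdiff_subset)
          _ ≤ (bg.flatMap (fun p => p.2)).length := List.toFinset_card_le _
          _ = (bg.map (fun p => p.2.length)).sum := by
              rw [List.length_flatMap]
      have hlen : (c1 ++ bg.flatMap (fun p => p.2)).length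
          = c1.length + (bg.map (fun p => p.2.length)).sum := by
        rw [List.length_append, List.length_flatMap]
      rw [hlen]
      exact pvTOP c2 bg (c1.length + (bg.map (fun p => p.2.length)).sum + 2) c1
        (PySem.Set.ofList c1) 0 (c1.length + (bg.map (fun p => p.2.length)).sum + 1)
        (PySem.Set.nodup_ofList c1) (fun _ => by omega)

-- ===== VERDICT (by name: the statement is the Claim_ definition above) =====
theorem cluster_distance_bg_py_spec : Claim_equal_cluster_distance_bg_py := by
  intro c1 c2 bg _
  unfold Spec_cluster_distance_bg_py
  exact pv_main_eq c1 c2 bg
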